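-- pv_equiv track=rewrite | github.com/pypi-data/pypi-mirror-398 | packages/pydrime/pydrime-0.8.2.tar.gz/pydrime-0.8.2/benchmarks/benchmark_json_config.py | parse_sync_output
-- ===== SOURCE A (Python) =====
-- def parse_sync_output(stdout: str) -> dict[str, int]:
--     """Parse sync command output to extract statistics.
--
--     This aggregates stats from multiple sync pairs in a single run.
--     """
--     stats = {
--         "uploaded": 0,
--         "downloaded": 0,
--         "deleted_local": 0,
--         "deleted_remote": 0,
--         "pairs_processed": 0,
--     }
--
--     for line in stdout.split("\n"):
--         line = line.strip()
--         if "Uploaded:" in line: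
--             parts = line.split(":")
--             if len(parts) >= 2:
--                 try:
--                     stats["uploaded"] += int(parts[1].strip())
--                 except ValueError:
--                     pass
--         elif "Downloaded:" in line:
--             parts = line.split(":")
--             if len(parts) >= 2:
--                 try:
--                     stats["downloaded"] += int(parts[1].strip())
--                 except ValueError:
--                     pass
--         elif "Deleted locally:" in line:
--             parts = line.split(":")
--             if len(parts) >= 2:
--                 try:
--                     stats["deleted_local"] += int(parts[1].strip())
--                 except ValueError:
--                     pass
--         elif "Deleted remotely:" in line:
--             parts = line.split(":")
--             if len(parts) >= 2:
--                 try: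
--                     stats["deleted_remote"] += int(parts[1].strip())
--                 except ValueError:
--                     pass
--         elif "Sync Pair" in line and "/" in line:
--             # Count "Sync Pair X/Y" lines
--             stats["pairs_processed"] += 1
--
--     return stats
-- ===== SOURCE B (Python) =====
-- def _classify(raw):
--     """Map one output line to at most one (stat_key, delta) event."""
--     line = raw.strip()
--     markers = (("Uploaded:", "uploaded"), ("Downloaded:", "downloaded"),
--                ("Deleted locally:", "deleted_local"), ("Deleted remotely:", "deleted_remote"))
--     key = next((k for m, k in markers if m in line), None)
--     if key is None:
--         return ("pairs_processed", 1) if "Sync Pair" in line and "/" in line else None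
--     parts = line.split(":")
--     if len(parts) >= 2:
--         try:
--             return (key, int(parts[1].strip()))
--         except ValueError:
--             return None
--     return None
--
--
-- def parse_sync_output(stdout: str) -> dict[str, int]:
--     """Parse sync command output to extract statistics.
--
--     Stage 1 maps every line to an optional (key, delta) event; stage 2
--     aggregates the event stream into the stats dict by summing per key.
--     """
--     events = [e for e in map(_classify, stdout.split("\n")) if e is not None]
--     return {key: sum(d for k, d in events if k == key)
--             for key in ("uploaded", "downloaded", "deleted_local",
--                         "deleted_remote", "pairs_processed")}
-- ===== Notes on version B (the rewrite author's own statement) =====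
-- stated objective: alternative
-- what changed: Replaces A's single stateful loop mutating a stats dict through five elif branches by a two-stage pipeline: a pure per-line classifier producing an optional (key, delta) event stream, then a per-key summation comprehension that builds the result dict from the events.
import Mathlib
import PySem

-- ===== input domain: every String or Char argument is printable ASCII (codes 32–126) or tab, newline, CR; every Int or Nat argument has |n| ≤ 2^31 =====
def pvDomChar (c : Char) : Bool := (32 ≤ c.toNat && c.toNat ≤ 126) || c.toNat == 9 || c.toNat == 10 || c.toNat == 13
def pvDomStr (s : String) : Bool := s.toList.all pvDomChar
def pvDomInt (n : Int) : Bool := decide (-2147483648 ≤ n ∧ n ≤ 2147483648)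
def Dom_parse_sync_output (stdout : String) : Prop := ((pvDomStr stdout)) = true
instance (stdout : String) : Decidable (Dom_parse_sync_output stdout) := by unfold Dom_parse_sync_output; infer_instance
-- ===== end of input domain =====

-- B replaces A's single stateful loop (five elif branches mutating one dict) by a
-- two-stage pipeline: classify every line into an optional (key, delta) event, then
-- build the result dict by summing the events per key (objective: alternative).

-- ===== PORT A =====
-- Literal transliteration of A: zeroed five-key dict, then a fold over the lines
-- with the elif chain, each numeric branch repeating the split/strip/int parse.
def parse_sync_output (stdout : String) : List (String × Int) :=
  let stats :=
    ((PySem.Str.split? stdout "\n").getD []).foldl (fun stats line0 =>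
      let line := PySem.Str.strip line0
      if PySem.Str.isIn "Uploaded:" line then
        let parts := (PySem.Str.split? line ":").getD []
        if parts.length ≥ 2 then
          match PySem.Int.ofStr? (PySem.Str.strip (parts.getD 1 "")) with
          | some n => stats.modify "uploaded" 0 (· + n)
          | none => stats
        else stats
      else if PySem.Str.isIn "Downloaded:" line then
        let parts := (PySem.Str.split? line ":").getD []
        if parts.length ≥ 2 then
          match PySem.Int.ofStr? (PySem.Str.strip (parts.getD 1 "")) with
          | some n => stats.modify "downloaded" 0 (· + n)
          | none => stats
        else stats
      else if PySem.Str.isIn "Deleted locally:" line then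
        let parts := (PySem.Str.split? line ":").getD []
        if parts.length ≥ 2 then
          match PySem.Int.ofStr? (PySem.Str.strip (parts.getD 1 "")) with
          | some n => stats.modify "deleted_local" 0 (· + n)
          | none => stats
        else stats
      else if PySem.Str.isIn "Deleted remotely:" line then
        let parts := (PySem.Str.split? line ":").getD []
        if parts.length ≥ 2 then
          match PySem.Int.ofStr? (PySem.Str.strip (parts.getD 1 "")) with
          | some n => stats.modify "deleted_remote" 0 (· + n)
          | none => stats
        else stats
      else if PySem.Str.isIn "Sync Pair" line && PySem.Str.isIn "/" line then
        stats.modify "pairs_processed" 0 (· + 1)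
      else stats) (((((PySem.Dict.empty.insert "uploaded" 0).insert "downloaded" 0).insert
        "deleted_local" 0).insert "deleted_remote" 0).insert "pairs_processed" 0)
  stats.items

-- ===== PORT B =====
-- Transliteration of Source B: _classify maps a line to an optional event (next over the
-- marker tuple = List.find?); the main function filters the classified lines and
-- builds the dict by a per-key sum comprehension (sum over a generator = foldl (+)).
def pvMarkers : List (String × String) :=
  [("Uploaded:", "uploaded"), ("Downloaded:", "downloaded"),
   ("Deleted locally:", "deleted_local"), ("Deleted remotely:", "deleted_remote")]

def pvClassify (raw : String) : Option (String × Int) :=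
  let line := PySem.Str.strip raw
  match (pvMarkers.find? (fun p => PySem.Str.isIn p.1 line)).map Prod.snd with
  | none =>
      if PySem.Str.isIn "Sync Pair" line && PySem.Str.isIn "/" line then
        some ("pairs_processed", 1)
      else none
  | some key =>
      let parts := (PySem.Str.split? line ":").getD []
      if parts.length ≥ 2 then
        match PySem.Int.ofStr? (PySem.Str.strip (parts.getD 1 "")) with
        | some n => some (key, n)
        | none => none
      else none

def parse_sync_output_alt (stdout : String) : List (String × Int) :=
  let events := (((PySem.Str.split? stdout "\n").getD []).map pvClassify).filterMap id
  ["uploaded", "downloaded", "deleted_local", "deleted_remote", "pairs_processed"].map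
    (fun key => (key, ((events.filter (fun e => e.1 == key)).foldl (fun s e => s + e.2) 0)))

-- ===== PRECONDITION & SPEC =====
def Spec_parse_sync_output (stdout : String) (out : List (String × Int)) : Prop := out = parse_sync_output_alt stdout
instance (stdout : String) (out : List (String × Int)) : Decidable (Spec_parse_sync_output stdout out) := by unfold Spec_parse_sync_output; infer_instance

-- ===== CLAIM (what is proved, stated in full; the proofs are below) =====
def Claim_equal_parse_sync_output : Prop := ∀ (stdout : String), Dom_parse_sync_output stdout → Spec_parse_sync_output stdout (parse_sync_output stdout)

-- ===== LEMMAS AND PROOFS =====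

-- the five-key dict with the given values, in A's insertion order (proof helper)
def pvD5 (a b c d e : Int) : PySem.Dict String Int :=
  (((((PySem.Dict.empty.insert "uploaded" a).insert "downloaded" b).insert
    "deleted_local" c).insert "deleted_remote" d).insert "pairs_processed" e)

-- A's loop body, named for the proofs (definitionally the lambda in parse_sync_output)
def pvStepA (stats : PySem.Dict String Int) (line0 : String) : PySem.Dict String Int :=
  let line := PySem.Str.strip line0
  if PySem.Str.isIn "Uploaded:" line then
    let parts := (PySem.Str.split? line ":").getD []
    if parts.length ≥ 2 then
      match PySem.Int.ofStr? (PySem.Str.strip (parts.getD 1 "")) with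
      | some n => stats.modify "uploaded" 0 (· + n)
      | none => stats
    else stats
  else if PySem.Str.isIn "Downloaded:" line then
    let parts := (PySem.Str.split? line ":").getD []
    if parts.length ≥ 2 then
      match PySem.Int.ofStr? (PySem.Str.strip (parts.getD 1 "")) with
      | some n => stats.modify "downloaded" 0 (· + n)
      | none => stats
    else stats
  else if PySem.Str.isIn "Deleted locally:" line then
    let parts := (PySem.Str.split? line ":").getD []
    if parts.length ≥ 2 then
      match PySem.Int.ofStr? (PySem.Str.strip (parts.getD 1 "")) with
      | some n => stats.modify "deleted_local" 0 (· + n)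
      | none => stats
    else stats
  else if PySem.Str.isIn "Deleted remotely:" line then
    let parts := (PySem.Str.split? line ":").getD []
    if parts.length ≥ 2 then
      match PySem.Int.ofStr? (PySem.Str.strip (parts.getD 1 "")) with
      | some n => stats.modify "deleted_remote" 0 (· + n)
      | none => stats
    else stats
  else if PySem.Str.isIn "Sync Pair" line && PySem.Str.isIn "/" line then
    stats.modify "pairs_processed" 0 (· + 1)
  else stats

-- contribution of one classified line to one key
def pvDelta (key l : String) : Int :=
  match pvClassify l with
  | some (k, n) => if k == key then n else 0
  | none => 0

-- per-key recursive event sum over the lines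
def pvSum (key : String) : List String → Int
  | [] => 0
  | l :: ls => pvDelta key l + pvSum key ls

theorem pvModify_uploaded (a b c d e n : Int) :
    (pvD5 a b c d e).modify "uploaded" 0 (· + n) = pvD5 (a + n) b c d e := by
  simp [pvD5, PySem.Dict.modify, PySem.Dict.insert, PySem.Dict.empty, PySem.Dict.getD, PySem.Dict.get?]

theorem pvModify_downloaded (a b c d e n : Int) :
    (pvD5 a b c d e).modify "downloaded" 0 (· + n) = pvD5 a (b + n) c d e := by
  simp [pvD5, PySem.Dict.modify, PySem.Dict.insert, PySem.Dict.empty, PySem.Dict.getD, PySem.Dict.get?]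

theorem pvModify_deleted_local (a b c d e n : Int) :
    (pvD5 a b c d e).modify "deleted_local" 0 (· + n) = pvD5 a b (c + n) d e := by
  simp [pvD5, PySem.Dict.modify, PySem.Dict.insert, PySem.Dict.empty, PySem.Dict.getD, PySem.Dict.get?]

theorem pvModify_deleted_remote (a b c d e n : Int) :
    (pvD5 a b c d e).modify "deleted_remote" 0 (· + n) = pvD5 a b c (d + n) e := by
  simp [pvD5, PySem.Dict.modify, PySem.Dict.insert, PySem.Dict.empty, PySem.Dict.getD, PySem.Dict.get?]

theorem pvModify_pairs (a b c d e n : Int) :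
    (pvD5 a b c d e).modify "pairs_processed" 0 (· + n) = pvD5 a b c d (e + n) := by
  simp [pvD5, PySem.Dict.modify, PySem.Dict.insert, PySem.Dict.empty, PySem.Dict.getD, PySem.Dict.get?]

-- A's loop body on the five-key dict = adding the per-key deltas of the classified line
theorem pvStep (l : String) (a b c d e : Int) :
    pvStepA (pvD5 a b c d e) l
      = pvD5 (a + pvDelta "uploaded" l) (b + pvDelta "downloaded" l)
          (c + pvDelta "deleted_local" l) (d + pvDelta "deleted_remote" l)
          (e + pvDelta "pairs_processed" l) := by
  unfold pvStepA pvDelta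
  rcases hb1 : PySem.Str.isIn "Uploaded:" (PySem.Str.strip l) with _ | _
  · -- "Uploaded:" not in line
    rcases hb2 : PySem.Str.isIn "Downloaded:" (PySem.Str.strip l) with _ | _
    · -- "Downloaded:" not in line
      rcases hb3 : PySem.Str.isIn "Deleted locally:" (PySem.Str.strip l) with _ | _
      · -- "Deleted locally:" not in line
        rcases hb4 : PySem.Str.isIn "Deleted remotely:" (PySem.Str.strip l) with _ | _
        · -- "Deleted remotely:" not in line
          have hc : pvMarkers.find? (fun p => PySem.Str.isIn p.1 (PySem.Str.strip l)) = none := by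
            simp only [pvMarkers, List.find?_cons, hb1, hb2, hb3, hb4, Bool.false_eq_true, if_false, List.find?_nil]
          simp only [hb1, hb2, hb3, hb4, Bool.false_eq_true, if_false, pvClassify, hc, Option.map]
          rcases hs5 : (PySem.Str.isIn "Sync Pair" (PySem.Str.strip l) && PySem.Str.isIn "/" (PySem.Str.strip l)) with _ | _
          · simp only [hs5, Bool.false_eq_true, if_false]
            simp
          · simp only [hs5, eq_self_iff_true, if_true, pvModify_pairs]
            simp
        · -- "Deleted remotely:" in line
          have hc : pvMarkers.find? (fun p => PySem.Str.isIn p.1 (PySem.Str.strip l)) = some ("Deleted remotely:", "deleted_remote") := by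
            simp only [pvMarkers, List.find?_cons, hb1, hb2, hb3, hb4, Bool.false_eq_true, if_false, if_true]
          simp only [hb1, hb2, hb3, hb4, Bool.false_eq_true, if_false, eq_self_iff_true, if_true, pvClassify, hc, Option.map]
          by_cases hp : ((PySem.Str.split? (PySem.Str.strip l) ":").getD []).length ≥ 2
          · rcases hn : PySem.Int.ofStr? (PySem.Str.strip (((PySem.Str.split? (PySem.Str.strip l) ":").getD []).getD 1 "")) with _ | n
            · simp [hp, hn]
            · simp [hp, hn, pvModify_deleted_remote]
          · simp [hp]
      · -- "Deleted locally:" in line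
        have hc : pvMarkers.find? (fun p => PySem.Str.isIn p.1 (PySem.Str.strip l)) = some ("Deleted locally:", "deleted_local") := by
          simp only [pvMarkers, List.find?_cons, hb1, hb2, hb3, Bool.false_eq_true, if_false, if_true]
        simp only [hb1, hb2, hb3, Bool.false_eq_true, if_false, eq_self_iff_true, if_true, pvClassify, hc, Option.map]
        by_cases hp : ((PySem.Str.split? (PySem.Str.strip l) ":").getD []).length ≥ 2
        · rcases hn : PySem.Int.ofStr? (PySem.Str.strip (((PySem.Str.split? (PySem.Str.strip l) ":").getD []).getD 1 "")) with _ | n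
          · simp [hp, hn]
          · simp [hp, hn, pvModify_deleted_local]
        · simp [hp]
    · -- "Downloaded:" in line
      have hc : pvMarkers.find? (fun p => PySem.Str.isIn p.1 (PySem.Str.strip l)) = some ("Downloaded:", "downloaded") := by
        simp only [pvMarkers, List.find?_cons, hb1, hb2, Bool.false_eq_true, if_false, if_true]
      simp only [hb1, hb2, Bool.false_eq_true, if_false, eq_self_iff_true, if_true, pvClassify, hc, Option.map]
      by_cases hp : ((PySem.Str.split? (PySem.Str.strip l) ":").getD []).length ≥ 2
      · rcases hn : PySem.Int.ofStr? (PySem.Str.strip (((PySem.Str.split? (PySem.Str.strip l) ":").getD []).getD 1 "")) with _ | n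
        · simp [hp, hn]
        · simp [hp, hn, pvModify_downloaded]
      · simp [hp]
  · -- "Uploaded:" in line
    have hc : pvMarkers.find? (fun p => PySem.Str.isIn p.1 (PySem.Str.strip l)) = some ("Uploaded:", "uploaded") := by
      simp only [pvMarkers, List.find?_cons, hb1, Bool.false_eq_true, if_false, if_true]
    simp only [hb1, Bool.false_eq_true, if_false, eq_self_iff_true, if_true, pvClassify, hc, Option.map]
    by_cases hp : ((PySem.Str.split? (PySem.Str.strip l) ":").getD []).length ≥ 2
    · rcases hn : PySem.Int.ofStr? (PySem.Str.strip (((PySem.Str.split? (PySem.Str.strip l) ":").getD []).getD 1 "")) with _ | n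
      · simp [hp, hn]
      · simp [hp, hn, pvModify_uploaded]
    · simp [hp]

-- A's fold, started at pvD5 a b c d e, adds the per-key event sums
theorem pvFoldA (lines : List String) : ∀ a b c d e : Int,
    lines.foldl pvStepA (pvD5 a b c d e)
      = pvD5 (a + pvSum "uploaded" lines) (b + pvSum "downloaded" lines)
          (c + pvSum "deleted_local" lines) (d + pvSum "deleted_remote" lines)
          (e + pvSum "pairs_processed" lines) := by
  induction lines with
  | nil => intro a b c d e; simp [pvSum]
  | cons l ls ih =>
    intro a b c d e
    rw [List.foldl_cons, pvStep, ih]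
    simp only [pvSum, add_assoc]

-- B's per-key foldl sum equals the recursive event sum
theorem pvFoldB (key : String) (lines : List String) : ∀ c : Int,
    ((lines.filterMap pvClassify).filter (fun e => e.1 == key)).foldl
      (fun s e => s + e.2) c = c + pvSum key lines := by
  induction lines with
  | nil => intro c; simp [pvSum]
  | cons l ls ih =>
    intro c
    rcases hc : pvClassify l with _ | ⟨k, n⟩
    · simp only [List.filterMap_cons, hc, pvSum, pvDelta]
      rw [ih]
      simp only [zero_add]
    · simp only [List.filterMap_cons, hc, List.filter_cons, pvSum, pvDelta]
      rcases hbk : (k == key) with _ | _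
      · simp only [hbk, Bool.false_eq_true, if_false]
        rw [ih]
        simp only [zero_add]
      · simp only [hbk, if_true, List.foldl_cons]
        rw [ih, add_assoc]

-- ===== VERDICT (by name: the statement is the Claim_ definition above) =====
theorem parse_sync_output_spec : Claim_equal_parse_sync_output := by
  intro stdout _
  unfold Spec_parse_sync_output parse_sync_output parse_sync_output_alt
  show (((PySem.Str.split? stdout "\n").getD []).foldl pvStepA (pvD5 0 0 0 0 0)).items = _
  rw [pvFoldA]
  simp only [List.filterMap_map, Function.id_comp]
  simp [pvD5, PySem.Dict.insert, PySem.Dict.empty, PySem.Dict.items, pvFoldB]
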